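-- pv_equiv track=rewrite | github.com/onewns/TIL | ps/BOJ_15486/solution1.py | solution
-- ===== SOURCE A (Python) =====
-- def solution(day, table):
--     dp = [0] * (day + 1)
--     arr = {i: [] for i in range(1, day + 1)}
--     for index, info in enumerate(table):
--         time, money = info
--         if index + time <= day:
--             arr[index + time].append((time, money))
--     for today in range(1, day + 1):
--         new_money = 0
--         for time, money in arr[today]:
--             new_money = max(new_money, dp[today - time] + money)
--         dp[today] = max(dp[today - 1], new_money)
--     return dp[-1]
-- ===== SOURCE B (Python) =====
-- def solution(day, table):
--     n = len(table)
--     dp = [0] * (day + 1)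
--     for i in range(day - 1, -1, -1):
--         best = dp[i + 1]
--         if i < n:
--             time, money = table[i]
--             if i + time <= day:
--                 best = max(best, money + dp[i + time])
--         dp[i] = best
--     return dp[0]
-- ===== Notes on version B (the rewrite author's own statement) =====
-- stated objective: simpler
-- what changed: Replaces A's two-phase forward DP (a bucket dict keyed by finish day built first, then a day-by-day scan of each bucket, indexing dp by days already passed) with a single backward DP over start indices that keeps best-earnings-from-here-onward and needs no dict at all.
-- outside the precondition, e.g. on solution(3, [(2, 4), (0, 1), (0, 1)]): A returns 4, B returns 5; on solution(2, [(9, 9), (0, 3)]): A returns 3, B returns 3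
import Mathlib
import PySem

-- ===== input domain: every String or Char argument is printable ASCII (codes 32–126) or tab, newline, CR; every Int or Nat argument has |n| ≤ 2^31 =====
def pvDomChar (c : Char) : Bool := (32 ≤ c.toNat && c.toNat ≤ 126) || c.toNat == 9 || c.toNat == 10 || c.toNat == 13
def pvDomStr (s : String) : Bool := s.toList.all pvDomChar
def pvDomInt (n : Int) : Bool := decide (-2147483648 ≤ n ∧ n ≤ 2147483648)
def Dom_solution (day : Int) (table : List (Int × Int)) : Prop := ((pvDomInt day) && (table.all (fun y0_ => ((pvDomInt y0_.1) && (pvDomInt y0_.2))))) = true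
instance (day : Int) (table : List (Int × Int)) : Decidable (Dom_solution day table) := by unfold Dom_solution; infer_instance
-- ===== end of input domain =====

-- B replaces A's bucket-dict + forward day-DP by a single dict-free backward DP over start
-- indices (objective: simpler); the return values are proved equal on Pre_.

-- ===== PORT A =====
-- literal port of A: dp = [0]*(day+1); arr = {i: [] for i in range(1, day+1)}; bucket fill; forward scan; dp[-1].
-- Python's arr[k].append raises KeyError on a missing key and dp[i] raises IndexError out of range;
-- under Pre_ (day ≥ 0, all times ≥ 1) every key/index touched is present, where Dict.modify / pyGetD are exact.
def solution (day : Int) (table : List (Int × Int)) : Int :=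
  let dp0 : List Int := PySem.List.pyRepeat [0] (day + 1)
  let arr0 : PySem.Dict Int (List (Int × Int)) :=
    (PySem.List.pyRange 1 (day + 1) 1).foldl (fun d i => d.insert i []) PySem.Dict.empty
  let arr := (PySem.List.enumerate table 0).foldl
    (fun d p => if p.1 + p.2.1 ≤ day then d.modify (p.1 + p.2.1) [] (fun l => l ++ [p.2]) else d) arr0
  let dp := (PySem.List.pyRange 1 (day + 1) 1).foldl
    (fun dp today =>
      let newMoney := (arr.getD today []).foldl
        (fun nm q => max nm (PySem.List.pyGetD dp (today - q.1) 0 + q.2)) 0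
      PySem.List.pySetD dp today (max (PySem.List.pyGetD dp (today - 1) 0) newMoney)) dp0
  PySem.List.pyGetD dp (-1) 0

-- ===== PORT B =====
-- literal port of Source B: backward DP, dp[i] = best earnings from day i on.
def solution_alt (day : Int) (table : List (Int × Int)) : Int :=
  let n : Int := PySem.List.len table
  let dp0 : List Int := PySem.List.pyRepeat [0] (day + 1)
  let dp := (PySem.List.pyRange (day - 1) (-1) (-1)).foldl
    (fun dp i =>
      let best := PySem.List.pyGetD dp (i + 1) 0
      let best := if i < n then
          let tm := PySem.List.pyGetD table i (0, 0)
          if i + tm.1 ≤ day then max best (tm.2 + PySem.List.pyGetD dp (i + tm.1) 0) else best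
        else best
      PySem.List.pySetD dp i best) dp0
  PySem.List.pyGetD dp 0 0

-- ===== PRECONDITION & SPEC =====
-- Pre_ asks for a nonnegative day horizon and that every job either has a positive
-- duration or does not fit the horizon (index + time > day, so both programs ignore it).
-- Outside it A either raises (day < 0: IndexError on dp[-1]; a nonpositive time whose
-- bucket key index+time falls outside the dict's keys 1..day: KeyError) or, where it
-- still returns, its value depends on reading dp entries the forward loop has not
-- written yet — an accident of A's evaluation order whose value coincides with B's
-- backward DP on many such inputs but not on all of them.
def Pre_solution (day : Int) (table : List (Int × Int)) : Prop :=
  0 ≤ day ∧ ∀ i ∈ List.range table.length,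
    1 ≤ (table.getD i (0, 0)).1 ∨ day < (i : Int) + (table.getD i (0, 0)).1
instance (day : Int) (table : List (Int × Int)) : Decidable (Pre_solution day table) := by
  unfold Pre_solution; infer_instance
def pvWitness_solution : Int × (List (Int × Int)) :=
  (7, [(3, 10), (5, 20), (1, 10), (1, 20), (2, 15), (4, 40), (2, 200)])
def Spec_solution (day : Int) (table : List (Int × Int)) (out : Int) : Prop := out = solution_alt day table
instance (day : Int) (table : List (Int × Int)) (out : Int) : Decidable (Spec_solution day table out) := by unfold Spec_solution; infer_instance

-- ===== CLAIM (what is proved, stated in full; the proofs are below) =====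
def Claim_equal_solution : Prop := ∀ (day : Int) (table : List (Int × Int)), Dom_solution day table → Pre_solution day table → Spec_solution day table (solution day table)

-- ===== LEMMAS AND PROOFS =====

def pvT (tb : List (Int × Int)) (i : Nat) : Int := (tb.getD i (0, 0)).1
def pvM (tb : List (Int × Int)) (i : Nat) : Int := (tb.getD i (0, 0)).2

def pvOpt (tb : List (Int × Int)) (h : Nat) (i : Nat) : Int :=
  if hi : i < h then
    if hc : 1 ≤ pvT tb i ∧ (i : Int) + pvT tb i ≤ (h : Int) then
      max (pvOpt tb h (i + 1)) (pvM tb i + pvOpt tb h (i + (pvT tb i).toNat))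
    else pvOpt tb h (i + 1)
  else 0
termination_by h - i
decreasing_by
  · omega
  · have := hc.1; omega
  · omega

lemma pvOpt_hzero (tb : List (Int × Int)) (h i : Nat) (hhi : h ≤ i) : pvOpt tb h i = 0 := by
  rw [pvOpt]; simp [Nat.not_lt.mpr hhi]

lemma pvOpt_nonneg (tb : List (Int × Int)) (h i : Nat) : 0 ≤ pvOpt tb h i := by
  rw [pvOpt]
  split_ifs with hi hc
  · exact le_trans (pvOpt_nonneg tb h (i+1)) (le_max_left _ _)
  · exact pvOpt_nonneg tb h (i+1)
  · exact le_refl 0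
termination_by h - i
decreasing_by
  · omega
  · omega

lemma pvOpt_skip (tb : List (Int × Int)) (h i : Nat)
    (hsk : ¬ (1 ≤ pvT tb i ∧ (i : Int) + pvT tb i ≤ (h : Int))) :
    pvOpt tb h i = pvOpt tb h (i + 1) := by
  by_cases hi : i < h
  · conv_lhs => rw [pvOpt]
    rw [dif_pos hi, dif_neg hsk]
  · rw [pvOpt_hzero _ _ _ (by omega), pvOpt_hzero _ _ _ (by omega)]

lemma pvOpt_unfold_take (tb : List (Int × Int)) (h i : Nat)
    (hc : 1 ≤ pvT tb i ∧ (i : Int) + pvT tb i ≤ (h : Int)) :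
    pvOpt tb h i = max (pvOpt tb h (i + 1)) (pvM tb i + pvOpt tb h (i + (pvT tb i).toNat)) := by
  have hi : i < h := by have := hc.1; have := hc.2; omega
  conv_lhs => rw [pvOpt]
  rw [dif_pos hi, dif_pos hc]

lemma pvOpt_take (tb : List (Int × Int)) (h i : Nat) (h1 : 1 ≤ pvT tb i)
    (h2 : (i : Int) + pvT tb i ≤ (h : Int)) :
    pvM tb i + pvOpt tb h (i + (pvT tb i).toNat) ≤ pvOpt tb h i := by
  rw [pvOpt_unfold_take tb h i ⟨h1, h2⟩]; exact le_max_right _ _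

lemma pvT_of_len_le (tb : List (Int × Int)) (i : Nat) (hl : tb.length ≤ i) : pvT tb i = 0 := by
  unfold pvT; rw [List.getD_eq_default _ _ hl]

lemma pvOpt_lenzero (tb : List (Int × Int)) (h i : Nat) (hl : tb.length ≤ i) : pvOpt tb h i = 0 := by
  by_cases hi : i < h
  · rw [pvOpt_skip tb h i (by rw [pvT_of_len_le tb i hl]; simp)]
    exact pvOpt_lenzero tb h (i+1) (by omega)
  · exact pvOpt_hzero tb h i (by omega)
termination_by h - i

lemma pvOpt_mono_start (tb : List (Int × Int)) (h i : Nat) : pvOpt tb h (i + 1) ≤ pvOpt tb h i := by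
  by_cases hi : i < h
  · conv_rhs => rw [pvOpt]
    rw [dif_pos hi]
    split_ifs with hc
    · exact le_max_left _ _
    · exact le_refl _
  · rw [pvOpt_hzero _ _ _ (by omega), pvOpt_hzero _ _ _ (by omega)]

lemma cfold_ge_init {α : Type} (l : List α) (c : α → Prop) [DecidablePred c] (f : α → Int) (a : Int) :
    a ≤ l.foldl (fun acc x => if c x then max acc (f x) else acc) a := by
  induction l generalizing a with
  | nil => simp
  | cons x t ih =>
    simp only [List.foldl_cons]
    refine le_trans ?_ (ih _)
    split_ifs with h
    · exact le_max_left _ _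
    · exact le_refl _

lemma cfold_ge_entry {α : Type} (l : List α) (c : α → Prop) [DecidablePred c] (f : α → Int) (a : Int)
    {x : α} (hx : x ∈ l) (hc : c x) :
    f x ≤ l.foldl (fun acc y => if c y then max acc (f y) else acc) a := by
  induction l generalizing a with
  | nil => simp at hx
  | cons y t ih =>
    simp only [List.foldl_cons]
    rcases List.mem_cons.mp hx with rfl | hx'
    · refine le_trans ?_ (cfold_ge_init t c f _)
      rw [if_pos hc]; exact le_max_right _ _
    · exact ih _ hx'

lemma cfold_le {α : Type} (l : List α) (c : α → Prop) [DecidablePred c] (f : α → Int) (a B : Int)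
    (ha : a ≤ B) (hf : ∀ x ∈ l, c x → f x ≤ B) :
    l.foldl (fun acc x => if c x then max acc (f x) else acc) a ≤ B := by
  induction l generalizing a with
  | nil => simpa using ha
  | cons x t ih =>
    simp only [List.foldl_cons]
    refine ih _ ?_ (fun y hy hcy => hf y (List.mem_cons_of_mem _ hy) hcy)
    split_ifs with h
    · exact max_le ha (hf x (List.mem_cons_self) h)
    · exact ha

lemma cfold_max_absorb {α : Type} (l : List α) (c : α → Prop) [DecidablePred c] (f : α → Int) (a b : Int) :
    l.foldl (fun acc x => if c x then max acc (f x) else acc) (max a b)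
      = max a (l.foldl (fun acc x => if c x then max acc (f x) else acc) b) := by
  induction l generalizing b with
  | nil => simp
  | cons x t ih =>
    simp only [List.foldl_cons]
    rw [← ih]
    congr 1
    split_ifs with h
    · rw [max_assoc]
    · rfl

def pvStep (tb : List (Int × Int)) (tgt lo : Nat) : Int → Nat → Int :=
  fun acc i => if 1 ≤ pvT tb i ∧ (i : Int) + pvT tb i = (tgt : Int) then
      max acc (pvM tb i + pvOpt tb i lo) else acc

-- fold of pvStep (inner start `lo`) over indices [s, tb.length)
def pvE' (tb : List (Int × Int)) (tgt lo s : Nat) (init : Int) : Int :=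
  (List.range' s (tb.length - s)).foldl (pvStep tb tgt lo) init

def pvE (tb : List (Int × Int)) (tgt lo : Nat) (init : Int) : Int := pvE' tb tgt lo lo init

lemma pvStep_apply (tb : List (Int × Int)) (tgt lo : Nat) (a : Int) (i : Nat) :
    pvStep tb tgt lo a i = if 1 ≤ pvT tb i ∧ (i : Int) + pvT tb i = (tgt : Int) then
      max a (pvM tb i + pvOpt tb i lo) else a := rfl

lemma pvE'_ge_init (tb : List (Int × Int)) (tgt lo s : Nat) (init : Int) :
    init ≤ pvE' tb tgt lo s init :=
  cfold_ge_init _ (fun i => 1 ≤ pvT tb i ∧ (i : Int) + pvT tb i = (tgt : Int))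
    (fun i => pvM tb i + pvOpt tb i lo) init

lemma pvE'_ge_entry (tb : List (Int × Int)) (tgt lo s : Nat) (init : Int)
    {i : Nat} (hs : s ≤ i) (hl : i < tb.length)
    (h1 : 1 ≤ pvT tb i) (h2 : (i : Int) + pvT tb i = (tgt : Int)) :
    pvM tb i + pvOpt tb i lo ≤ pvE' tb tgt lo s init :=
  cfold_ge_entry _ (fun i => 1 ≤ pvT tb i ∧ (i : Int) + pvT tb i = (tgt : Int))
    (fun i => pvM tb i + pvOpt tb i lo) init (by rw [List.mem_range'_1]; omega) ⟨h1, h2⟩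

lemma pvE'_le (tb : List (Int × Int)) (tgt lo s : Nat) (init B : Int)
    (ha : init ≤ B)
    (hf : ∀ i : Nat, s ≤ i → i < tb.length → 1 ≤ pvT tb i → (i : Int) + pvT tb i = (tgt : Int) →
      pvM tb i + pvOpt tb i lo ≤ B) :
    pvE' tb tgt lo s init ≤ B :=
  cfold_le _ (fun i => 1 ≤ pvT tb i ∧ (i : Int) + pvT tb i = (tgt : Int))
    (fun i => pvM tb i + pvOpt tb i lo) init B ha
    (fun i hi hc => by
      rw [List.mem_range'_1] at hi
      exact hf i hi.1 (by omega) hc.1 hc.2)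

lemma pvE_peel (tb : List (Int × Int)) (tgt lo : Nat) (init : Int) (hlen : lo < tb.length) :
    pvE tb tgt lo init = pvE' tb tgt lo (lo + 1) (pvStep tb tgt lo init lo) := by
  unfold pvE pvE'
  have hsplit : tb.length - lo = (tb.length - (lo + 1)) + 1 := by omega
  rw [hsplit, List.range'_succ, List.foldl_cons]

theorem pvOpt_last (tb : List (Int × Int)) (h lo : Nat) :
    pvOpt tb (h + 1) lo = pvE tb (h + 1) lo (pvOpt tb h lo) := by
  by_cases hlen : tb.length ≤ lo
  · have h0 : tb.length - lo = 0 := by omega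
    unfold pvE pvE'
    rw [h0, List.range'_zero, List.foldl_nil, pvOpt_lenzero tb (h+1) lo hlen,
      pvOpt_lenzero tb h lo hlen]
  · push_neg at hlen
    by_cases hlo : h + 1 ≤ lo
    · rw [pvOpt_hzero tb (h+1) lo hlo]
      have hinit : pvOpt tb h lo = 0 := pvOpt_hzero tb h lo (by omega)
      have hz : pvE tb (h + 1) lo (pvOpt tb h lo) = 0 := by
        rw [hinit]
        refine le_antisymm (pvE'_le tb (h+1) lo lo _ _ le_rfl ?_) (pvE'_ge_init tb (h+1) lo lo _)
        intro i hi _ h1 h2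
        exfalso; omega
      exact hz.symm
    · push_neg at hlo
      have IH1 := pvOpt_last tb h (lo + 1)
      rw [pvE_peel tb (h+1) lo _ hlen, pvStep_apply]
      by_cases hg : 1 ≤ pvT tb lo
      · rcases lt_trichotomy ((lo : Int) + pvT tb lo) (((h : Nat) : Int) + 1) with hA | hB | hC
        · -- (a): job lo also fits below horizon h
          have hAh : (lo : Int) + pvT tb lo ≤ ((h : Nat) : Int) := by omega
          have IH2 := pvOpt_last tb h (lo + (pvT tb lo).toNat)
          rw [if_neg (by push_cast; omega)]
          rw [pvOpt_unfold_take tb (h+1) lo ⟨hg, by push_cast; omega⟩, IH1, IH2]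
          have hOlo : pvOpt tb h lo
              = max (pvOpt tb h (lo + 1)) (pvM tb lo + pvOpt tb h (lo + (pvT tb lo).toNat)) :=
            pvOpt_unfold_take tb h lo ⟨hg, hAh⟩
          unfold pvE
          refine le_antisymm (max_le ?_ ?_) ?_
          · refine pvE'_le tb (h+1) (lo+1) (lo+1) _ _ ?_ ?_
            · refine le_trans ?_ (pvE'_ge_init tb (h+1) lo (lo+1) _)
              rw [hOlo]; exact le_max_left _ _
            · intro i hi hl h1 h2
              refine le_trans (add_le_add le_rfl (pvOpt_mono_start tb i lo)) ?_
              exact pvE'_ge_entry tb (h+1) lo (lo+1) _ hi hl h1 h2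
          · have hb : pvE' tb (h+1) (lo + (pvT tb lo).toNat) (lo + (pvT tb lo).toNat)
                (pvOpt tb h (lo + (pvT tb lo).toNat))
                ≤ pvE' tb (h+1) lo (lo+1) (pvOpt tb h lo) - pvM tb lo := by
              refine pvE'_le tb (h+1) _ _ _ _ ?_ ?_
              · have h1 : pvM tb lo + pvOpt tb h (lo + (pvT tb lo).toNat) ≤ pvOpt tb h lo :=
                  pvOpt_take tb h lo hg hAh
                have h2 : pvOpt tb h lo ≤ pvE' tb (h+1) lo (lo+1) (pvOpt tb h lo) :=
                  pvE'_ge_init tb (h+1) lo (lo+1) _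
                linarith
              · intro i hi hl h1 h2
                have htake : pvM tb lo + pvOpt tb i (lo + (pvT tb lo).toNat) ≤ pvOpt tb i lo :=
                  pvOpt_take tb i lo hg (by omega)
                have hent : pvM tb i + pvOpt tb i lo ≤ pvE' tb (h+1) lo (lo+1) (pvOpt tb h lo) :=
                  pvE'_ge_entry tb (h+1) lo (lo+1) _ (by omega) hl h1 h2
                linarith
            linarith
          · refine pvE'_le tb (h+1) lo (lo+1) _ _ ?_ ?_
            · rw [hOlo]
              refine max_le (le_trans (pvE'_ge_init tb (h+1) (lo+1) (lo+1) _) (le_max_left _ _)) ?_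
              exact le_trans (add_le_add le_rfl (pvE'_ge_init tb (h+1) (lo + (pvT tb lo).toNat) (lo + (pvT tb lo).toNat) _)) (le_max_right _ _)
            · intro i hi hl h1 h2
              by_cases hti : (lo : Int) + pvT tb lo ≤ (i : Int)
              · rw [pvOpt_unfold_take tb i lo ⟨hg, hti⟩, ← max_add_add_left]
                refine max_le ?_ ?_
                · exact le_trans (pvE'_ge_entry tb (h+1) (lo+1) (lo+1) _ hi hl h1 h2) (le_max_left _ _)
                · have e2 : pvM tb i + pvOpt tb i (lo + (pvT tb lo).toNat)
                      ≤ pvE' tb (h+1) (lo + (pvT tb lo).toNat) (lo + (pvT tb lo).toNat) (pvOpt tb h (lo + (pvT tb lo).toNat)) :=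
                    pvE'_ge_entry tb (h+1) _ _ _ (by omega) hl h1 h2
                  have : pvM tb i + (pvM tb lo + pvOpt tb i (lo + (pvT tb lo).toNat))
                      ≤ pvM tb lo + pvE' tb (h+1) (lo + (pvT tb lo).toNat) (lo + (pvT tb lo).toNat) (pvOpt tb h (lo + (pvT tb lo).toNat)) := by linarith
                  exact le_trans this (le_max_right _ _)
              · rw [pvOpt_skip tb i lo (fun hcon => hti hcon.2)]
                exact le_trans (pvE'_ge_entry tb (h+1) (lo+1) (lo+1) _ hi hl h1 h2) (le_max_left _ _)
        · -- (b): job lo ends exactly at h+1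
          have hskH : ¬ (1 ≤ pvT tb lo ∧ (lo : Int) + pvT tb lo ≤ ((h : Nat) : Int)) := by
            intro hc; omega
          have htoNat : lo + (pvT tb lo).toNat = h + 1 := by omega
          rw [if_pos ⟨hg, by push_cast; omega⟩]
          rw [pvOpt_unfold_take tb (h+1) lo ⟨hg, by push_cast; omega⟩, IH1, htoNat,
            pvOpt_hzero tb (h+1) (h+1) le_rfl, pvOpt_hzero tb lo lo le_rfl]
          rw [pvOpt_skip tb h lo hskH]
          unfold pvE
          refine le_antisymm (max_le ?_ ?_) ?_
          · refine pvE'_le tb (h+1) (lo+1) (lo+1) _ _ ?_ ?_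
            · refine le_trans ?_ (pvE'_ge_init tb (h+1) lo (lo+1) _)
              exact le_max_left _ _
            · intro i hi hl h1 h2
              refine le_trans (add_le_add le_rfl (pvOpt_mono_start tb i lo)) ?_
              exact pvE'_ge_entry tb (h+1) lo (lo+1) _ hi hl h1 h2
          · refine le_trans ?_ (pvE'_ge_init tb (h+1) lo (lo+1) _)
            rw [add_zero]
            exact le_max_right _ _
          · refine pvE'_le tb (h+1) lo (lo+1) _ _ ?_ ?_
            · rw [add_zero]
              exact max_le_max (pvE'_ge_init tb (h+1) (lo+1) (lo+1) _) le_rfl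
            · intro i hi hl h1 h2
              have hile : ¬ (1 ≤ pvT tb lo ∧ (lo : Int) + pvT tb lo ≤ (i : Int)) := by
                intro hc; omega
              rw [pvOpt_skip tb i lo hile]
              exact le_trans (pvE'_ge_entry tb (h+1) (lo+1) (lo+1) _ hi hl h1 h2) (le_max_left _ _)
        · -- (c): job lo does not fit below h+1
          have hskH : ¬ (1 ≤ pvT tb lo ∧ (lo : Int) + pvT tb lo ≤ ((h : Nat) : Int)) := by
            intro hc; omega
          rw [if_neg (by push_cast; omega)]
          rw [pvOpt_skip tb (h+1) lo (by push_cast; intro hc; omega), IH1, pvOpt_skip tb h lo hskH]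
          unfold pvE
          refine le_antisymm ?_ ?_
          · refine pvE'_le tb (h+1) (lo+1) (lo+1) _ _ (pvE'_ge_init tb (h+1) lo (lo+1) _) ?_
            intro i hi hl h1 h2
            refine le_trans (add_le_add le_rfl (pvOpt_mono_start tb i lo)) ?_
            exact pvE'_ge_entry tb (h+1) lo (lo+1) _ hi hl h1 h2
          · refine pvE'_le tb (h+1) lo (lo+1) _ _ (pvE'_ge_init tb (h+1) (lo+1) (lo+1) _) ?_
            intro i hi hl h1 h2
            have hile : ¬ (1 ≤ pvT tb lo ∧ (lo : Int) + pvT tb lo ≤ (i : Int)) := by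
              intro hc; omega
            rw [pvOpt_skip tb i lo hile]
            exact pvE'_ge_entry tb (h+1) (lo+1) (lo+1) _ hi hl h1 h2
      · -- pvT tb lo < 1 : always skip
        rw [if_neg (fun hc => hg hc.1)]
        rw [pvOpt_skip tb (h+1) lo (fun hc => hg hc.1), IH1,
          pvOpt_skip tb h lo (fun hc => hg hc.1)]
        unfold pvE
        refine le_antisymm ?_ ?_
        · refine pvE'_le tb (h+1) (lo+1) (lo+1) _ _ (pvE'_ge_init tb (h+1) lo (lo+1) _) ?_
          intro i hi hl h1 h2
          refine le_trans (add_le_add le_rfl (pvOpt_mono_start tb i lo)) ?_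
          exact pvE'_ge_entry tb (h+1) lo (lo+1) _ hi hl h1 h2
        · refine pvE'_le tb (h+1) lo (lo+1) _ _ (pvE'_ge_init tb (h+1) (lo+1) (lo+1) _) ?_
          intro i hi hl h1 h2
          rw [pvOpt_skip tb i lo (fun hc => hg hc.1)]
          exact pvE'_ge_entry tb (h+1) (lo+1) (lo+1) _ hi hl h1 h2
termination_by tb.length - lo
decreasing_by
  · omega
  · omega

-- step function of B's loop (definitionally the lambda in solution_alt)
def altStep (tb : List (Int × Int)) (day : Int) : List Int → Int → List Int :=
  fun dp i =>
    let best := PySem.List.pyGetD dp (i + 1) 0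
    let best := if i < PySem.List.len tb then
        let tm := PySem.List.pyGetD tb i (0, 0)
        if i + tm.1 ≤ day then max best (tm.2 + PySem.List.pyGetD dp (i + tm.1) 0) else best
      else best
    PySem.List.pySetD dp i best

lemma getD_set_eq (l : List Int) (j k : Nat) (v : Int) (hj : j < l.length) :
    (l.set j v).getD k 0 = if k = j then v else l.getD k 0 := by
  simp only [List.getD_eq_getElem?_getD, List.getElem?_set]
  split_ifs with h1 h2 h3
  · subst h2; simp
  · omega
  · omega
  · rfl

lemma altLoop (tb : List (Int × Int)) (D : Nat)
    (hPre : ∀ i : Nat, i < tb.length → (i : Int) + pvT tb i ≤ (D : Int) → 1 ≤ pvT tb i) :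
    ∀ (j : Nat) (dp : List Int), j ≤ D → dp.length = D + 1 →
      (∀ k : Nat, j ≤ k → k ≤ D → dp.getD k 0 = pvOpt tb D k) →
      ((PySem.List.pyRange ((j : Int) - 1) (-1) (-1)).foldl (altStep tb (D : Int)) dp).length = D + 1 ∧
      ∀ k : Nat, k ≤ D →
        ((PySem.List.pyRange ((j : Int) - 1) (-1) (-1)).foldl (altStep tb (D : Int)) dp).getD k 0 = pvOpt tb D k := by
  intro j
  induction j with
  | zero =>
    intro dp _ hlen hinv
    rw [show ((0 : Nat) : Int) - 1 = -1 by norm_num,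
      PySem.List.pyRange_neg_one_eq_nil le_rfl, List.foldl_nil]
    exact ⟨hlen, fun k hk => hinv k (Nat.zero_le k) hk⟩
  | succ j ih =>
    intro dp hj hlen hinv
    have hcast : ((j + 1 : Nat) : Int) - 1 = (j : Int) := by push_cast; ring
    rw [hcast, PySem.List.pyRange_neg_one_cons (by omega), List.foldl_cons]
    have hread1 : PySem.List.pyGetD dp ((j : Int) + 1) 0 = pvOpt tb D (j + 1) := by
      rw [show ((j : Int) + 1) = ((j + 1 : Nat) : Int) by push_cast; ring,
        PySem.List.pyGetD_natCast]
      exact hinv (j + 1) le_rfl hj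
    have hbest : altStep tb (D : Int) dp (j : Int) = PySem.List.pySetD dp (j : Int) (pvOpt tb D j) := by
      unfold altStep
      simp only [PySem.List.len_eq, PySem.List.pyGetD_natCast, hread1]
      by_cases hjn : (j : Int) < (tb.length : Int)
      · rw [if_pos hjn]
        have hjn' : j < tb.length := by exact_mod_cast hjn
        by_cases hfit : (j : Int) + pvT tb j ≤ (D : Int)
        · have h1 : 1 ≤ pvT tb j := hPre j hjn' hfit
          have hcast2 : (j : Int) + (tb.getD j (0, 0)).1 = ((j + (pvT tb j).toNat : Nat) : Int) := by
            unfold pvT at h1 ⊢; omega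
          rw [if_pos (by unfold pvT at hfit; exact_mod_cast hfit)]
          rw [hcast2, PySem.List.pyGetD_natCast]
          rw [hinv (j + (pvT tb j).toNat) (by omega) (by unfold pvT at h1 hfit ⊢; omega)]
          rw [show ((tb.getD j (0, 0)).2 : Int) = pvM tb j from rfl]
          rw [← pvOpt_unfold_take tb D j ⟨h1, hfit⟩]
        · rw [if_neg (by unfold pvT at hfit; exact_mod_cast hfit)]
          rw [← pvOpt_skip tb D j (fun hc => hfit hc.2)]
      · rw [if_neg hjn]
        have hjn' : tb.length ≤ j := by omega
        rw [← pvOpt_skip tb D j (by rw [pvT_of_len_le tb j hjn']; simp)]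
    rw [hbest, PySem.List.pySetD_natCast]
    apply ih
    · omega
    · simp [hlen]
    · intro k hk1 hk2
      rw [getD_set_eq dp j k _ (by omega)]
      split_ifs with he
      · subst he; rfl
      · exact hinv k (by omega) hk2

-- ===== A side =====

lemma arr0_getD (l : List Int) (k : Int) :
    ((l.foldl (fun d i => d.insert i ([] : List (Int × Int))) PySem.Dict.empty).getD k []) = [] := by
  suffices H : ∀ d : PySem.Dict Int (List (Int × Int)), d.getD k [] = [] →
      (l.foldl (fun d i => d.insert i []) d).getD k [] = [] from
    H PySem.Dict.empty (PySem.Dict.getD_empty k [])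
  induction l with
  | nil => intro d hd; simpa using hd
  | cons x t ih =>
    intro d hd
    simp only [List.foldl_cons]
    refine ih _ ?_
    rw [PySem.Dict.getD_insert]
    split_ifs <;> simp [hd]

lemma arr_getD (tb : List (Int × Int)) (day e : Int) :
    (((PySem.List.enumerate tb 0).foldl
        (fun d p => if p.1 + p.2.1 ≤ day then d.modify (p.1 + p.2.1) [] (fun l => l ++ [p.2]) else d)
        ((PySem.List.pyRange 1 (day + 1) 1).foldl (fun d i => d.insert i []) PySem.Dict.empty)).getD e [])
    = ((((PySem.List.enumerate tb 0).filter (fun p => decide (p.1 + p.2.1 ≤ day))).map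
        (fun p => (p.1 + p.2.1, p.2))).filter (fun q => q.1 == e)).map (fun q => q.2) := by
  have h1 : (PySem.List.enumerate tb 0).foldl
      (fun d p => if p.1 + p.2.1 ≤ day then d.modify (p.1 + p.2.1) [] (fun l => l ++ [p.2]) else d)
      ((PySem.List.pyRange 1 (day + 1) 1).foldl (fun d i => d.insert i []) PySem.Dict.empty)
      = ((PySem.List.enumerate tb 0).filter (fun p => decide (p.1 + p.2.1 ≤ day))).foldl
        (fun d p => d.modify (p.1 + p.2.1) [] (fun l => l ++ [p.2]))
        ((PySem.List.pyRange 1 (day + 1) 1).foldl (fun d i => d.insert i []) PySem.Dict.empty) :=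
    PySem.List.foldl_ite_eq_foldl_filter _ _ _ _
  have h2 : ((PySem.List.enumerate tb 0).filter (fun p => decide (p.1 + p.2.1 ≤ day))).foldl
        (fun d p => d.modify (p.1 + p.2.1) [] (fun l => l ++ [p.2]))
        ((PySem.List.pyRange 1 (day + 1) 1).foldl (fun d i => d.insert i []) PySem.Dict.empty)
      = (((PySem.List.enumerate tb 0).filter (fun p => decide (p.1 + p.2.1 ≤ day))).map
          (fun p => (p.1 + p.2.1, p.2))).foldl
        (fun d q => d.modify q.1 [] (fun l => l ++ [q.2]))
        ((PySem.List.pyRange 1 (day + 1) 1).foldl (fun d i => d.insert i []) PySem.Dict.empty) :=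
    (List.foldl_map (f := fun p : Int × (Int × Int) => (p.1 + p.2.1, p.2))
      (g := fun (d : PySem.Dict Int (List (Int × Int))) q => d.modify q.1 [] (fun l => l ++ [q.2]))).symm
  rw [h1, h2, PySem.Dict.getD_foldl_modify_append, arr0_getD, List.nil_append]

lemma newmoney_eq (tb : List (Int × Int)) (D c : Nat)
    (hPre : ∀ i : Nat, i < tb.length → (i : Int) + pvT tb i ≤ (D : Int) → 1 ≤ pvT tb i) (hcD : c < D)
    (dp : List Int) (hinv : ∀ k : Nat, k ≤ c → dp.getD k 0 = pvOpt tb k 0) :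
    (((((PySem.List.enumerate tb 0).filter (fun p => decide (p.1 + p.2.1 ≤ (D : Int)))).map
        (fun p => (p.1 + p.2.1, p.2))).filter (fun q => q.1 == ((c + 1 : Nat) : Int))).map
        (fun q => q.2)).foldl
      (fun nm q => max nm (PySem.List.pyGetD dp (((c + 1 : Nat) : Int) - q.1) 0 + q.2)) 0
    = pvE' tb (c + 1) 0 0 0 := by
  have h1 : (((((PySem.List.enumerate tb 0).filter (fun p => decide (p.1 + p.2.1 ≤ (D : Int)))).map
        (fun p => (p.1 + p.2.1, p.2))).filter (fun q => q.1 == ((c + 1 : Nat) : Int))).map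
        (fun q => q.2)).foldl
      (fun nm q => max nm (PySem.List.pyGetD dp (((c + 1 : Nat) : Int) - q.1) 0 + q.2)) 0
      = ((((PySem.List.enumerate tb 0).filter (fun p => decide (p.1 + p.2.1 ≤ (D : Int)))).map
        (fun p => (p.1 + p.2.1, p.2))).filter (fun q => q.1 == ((c + 1 : Nat) : Int))).foldl
      (fun nm r => max nm (PySem.List.pyGetD dp (((c + 1 : Nat) : Int) - r.2.1) 0 + r.2.2)) 0 :=
    List.foldl_map
  have h2 : ((((PySem.List.enumerate tb 0).filter (fun p => decide (p.1 + p.2.1 ≤ (D : Int)))).map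
        (fun p => (p.1 + p.2.1, p.2))).filter (fun q => q.1 == ((c + 1 : Nat) : Int))).foldl
      (fun nm r => max nm (PySem.List.pyGetD dp (((c + 1 : Nat) : Int) - r.2.1) 0 + r.2.2)) 0
      = (((PySem.List.enumerate tb 0).filter (fun p => decide (p.1 + p.2.1 ≤ (D : Int)))).map
        (fun p => (p.1 + p.2.1, p.2))).foldl
      (fun nm r => if r.1 == ((c + 1 : Nat) : Int) then
        max nm (PySem.List.pyGetD dp (((c + 1 : Nat) : Int) - r.2.1) 0 + r.2.2) else nm) 0 :=
    (PySem.List.foldl_if_eq_foldl_filter _ _ _ _).symm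
  have h3 : (((PySem.List.enumerate tb 0).filter (fun p => decide (p.1 + p.2.1 ≤ (D : Int)))).map
        (fun p => (p.1 + p.2.1, p.2))).foldl
      (fun nm r => if r.1 == ((c + 1 : Nat) : Int) then
        max nm (PySem.List.pyGetD dp (((c + 1 : Nat) : Int) - r.2.1) 0 + r.2.2) else nm) 0
      = ((PySem.List.enumerate tb 0).filter (fun p => decide (p.1 + p.2.1 ≤ (D : Int)))).foldl
      (fun nm p => if (p.1 + p.2.1) == ((c + 1 : Nat) : Int) then
        max nm (PySem.List.pyGetD dp (((c + 1 : Nat) : Int) - p.2.1) 0 + p.2.2) else nm) 0 :=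
    List.foldl_map
  have h4 : ((PySem.List.enumerate tb 0).filter (fun p => decide (p.1 + p.2.1 ≤ (D : Int)))).foldl
      (fun nm p => if (p.1 + p.2.1) == ((c + 1 : Nat) : Int) then
        max nm (PySem.List.pyGetD dp (((c + 1 : Nat) : Int) - p.2.1) 0 + p.2.2) else nm) 0
      = (PySem.List.enumerate tb 0).foldl
      (fun nm p => if p.1 + p.2.1 ≤ (D : Int) then
        (if (p.1 + p.2.1) == ((c + 1 : Nat) : Int) then
          max nm (PySem.List.pyGetD dp (((c + 1 : Nat) : Int) - p.2.1) 0 + p.2.2) else nm) else nm) 0 :=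
    (PySem.List.foldl_ite_eq_foldl_filter _ _ _ _).symm
  rw [h1, h2, h3, h4]
  rw [PySem.List.enumerate_eq_map_pyRange tb (0, 0), List.foldl_map,
    PySem.List.len_eq, PySem.List.pyRange_zero_nat, List.foldl_map]
  unfold pvE'
  rw [Nat.sub_zero, ← List.range_eq_range']
  refine PySem.List.foldl_congr_mem _ _ _ _ ?_
  intro acc k hk
  rw [List.mem_range] at hk
  simp only [PySem.List.pyGetD_natCast]
  rw [show (tb.getD k (0, 0)).1 = pvT tb k from rfl,
    show (tb.getD k (0, 0)).2 = pvM tb k from rfl]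
  rw [pvStep_apply]
  by_cases hke : (k : Int) + pvT tb k = ((c + 1 : Nat) : Int)
  · have hle : (k : Int) + pvT tb k ≤ (D : Int) := by omega
    have h1t : 1 ≤ pvT tb k := hPre k hk hle
    have hkc : k ≤ c := by omega
    have hidx : ((c + 1 : Nat) : Int) - pvT tb k = ((k : Nat) : Int) := by omega
    rw [if_pos hle, if_pos (show ((k : Int) + pvT tb k == ((c + 1 : Nat) : Int)) = true by simp [hke]),
      if_pos (show 1 ≤ pvT tb k ∧ (k : Int) + pvT tb k = ((c + 1 : Nat) : Int) from ⟨h1t, hke⟩),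
      hidx, PySem.List.pyGetD_natCast, hinv k hkc, add_comm (pvOpt tb k 0) (pvM tb k)]
  · rw [if_neg (show ¬ (1 ≤ pvT tb k ∧ (k : Int) + pvT tb k = ((c + 1 : Nat) : Int)) from fun hc => hke hc.2)]
    split_ifs with hle hbe
    · exact absurd (by simpa using hbe) hke
    · rfl
    · rfl

def solStep (arrv : PySem.Dict Int (List (Int × Int))) : List Int → Int → List Int :=
  fun dp today =>
    PySem.List.pySetD dp today (max (PySem.List.pyGetD dp (today - 1) 0)
      ((arrv.getD today []).foldl (fun nm q => max nm (PySem.List.pyGetD dp (today - q.1) 0 + q.2)) 0))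

lemma pvE'_max_absorb (tb : List (Int × Int)) (tgt lo s : Nat) (a b : Int) :
    pvE' tb tgt lo s (max a b) = max a (pvE' tb tgt lo s b) :=
  cfold_max_absorb _ (fun i => 1 ≤ pvT tb i ∧ (i : Int) + pvT tb i = (tgt : Int))
    (fun i => pvM tb i + pvOpt tb i lo) a b

lemma pvOpt_succ_split (tb : List (Int × Int)) (c : Nat) :
    pvOpt tb (c + 1) 0 = max (pvOpt tb c 0) (pvE' tb (c + 1) 0 0 0) := by
  rw [pvOpt_last tb c 0]
  unfold pvE
  conv_lhs => rw [show pvOpt tb c 0 = max (pvOpt tb c 0) 0 from (max_eq_left (pvOpt_nonneg tb c 0)).symm]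
  exact pvE'_max_absorb tb (c + 1) 0 0 (pvOpt tb c 0) 0

theorem solLoop (tb : List (Int × Int)) (D : Nat)
    (hPre : ∀ i : Nat, i < tb.length → (i : Int) + pvT tb i ≤ (D : Int) → 1 ≤ pvT tb i)
    (arrv : PySem.Dict Int (List (Int × Int)))
    (harr : ∀ e : Int, arrv.getD e [] =
      ((((PySem.List.enumerate tb 0).filter (fun p => decide (p.1 + p.2.1 ≤ (D : Int)))).map
        (fun p => (p.1 + p.2.1, p.2))).filter (fun q => q.1 == e)).map (fun q => q.2))
    (c : Nat) (dp : List Int) (hc : c ≤ D) (hlen : dp.length = D + 1)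
    (hinv : ∀ k : Nat, k ≤ c → dp.getD k 0 = pvOpt tb k 0) :
    ((PySem.List.pyRange ((c : Int) + 1) ((D : Int) + 1) 1).foldl (solStep arrv) dp).length = D + 1 ∧
    ∀ k : Nat, k ≤ D →
      ((PySem.List.pyRange ((c : Int) + 1) ((D : Int) + 1) 1).foldl (solStep arrv) dp).getD k 0
        = pvOpt tb k 0 := by
  by_cases hcD : c = D
  · subst hcD
    rw [PySem.List.pyRange_one_eq_nil le_rfl, List.foldl_nil]
    refine ⟨hlen, fun k hk => ?_⟩
    exact hinv k hk
  · have hlt : c < D := by omega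
    rw [PySem.List.pyRange_one_cons (by omega : ((c : Int) + 1) < (D : Int) + 1), List.foldl_cons]
    have hstep : solStep arrv dp ((c : Int) + 1)
        = PySem.List.pySetD dp ((c : Int) + 1) (pvOpt tb (c + 1) 0) := by
      unfold solStep
      rw [show (c : Int) + 1 - 1 = ((c : Nat) : Int) from by ring, PySem.List.pyGetD_natCast,
        hinv c le_rfl]
      rw [show (c : Int) + 1 = ((c + 1 : Nat) : Int) from by push_cast; ring]
      rw [harr ((c + 1 : Nat) : Int)]
      rw [newmoney_eq tb D c hPre hlt dp hinv]
      rw [← pvOpt_succ_split tb c]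
    rw [hstep]
    rw [show (c : Int) + 1 = ((c + 1 : Nat) : Int) from by push_cast; ring,
      PySem.List.pySetD_natCast]
    have hnewinv : ∀ k : Nat, k ≤ c + 1 → (dp.set (c + 1) (pvOpt tb (c + 1) 0)).getD k 0 = pvOpt tb k 0 := by
      intro k hk
      rw [getD_set_eq dp (c + 1) k _ (by omega)]
      split_ifs with he
      · subst he; rfl
      · exact hinv k (by omega)
    have H := solLoop tb D hPre arrv harr (c + 1) (dp.set (c + 1) (pvOpt tb (c + 1) 0))
      (by omega) (by simp [hlen]) hnewinv
    exact H
termination_by D - c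

lemma alt_eq_opt (day : Int) (table : List (Int × Int)) (hday : 0 ≤ day)
    (hPre : ∀ i : Nat, i < table.length → (i : Int) + pvT table i ≤ day → 1 ≤ pvT table i) :
    solution_alt day table = pvOpt table day.toNat 0 := by
  have halt : solution_alt day table = PySem.List.pyGetD
      ((PySem.List.pyRange (day - 1) (-1) (-1)).foldl (altStep table day)
        (PySem.List.pyRepeat [0] (day + 1))) 0 0 := rfl
  rw [halt]
  set D := day.toNat with hDdef
  have hD : day = ((D : Nat) : Int) := by omega
  rw [hD] at hPre
  rw [hD, PySem.List.pyRepeat_singleton, show (((D : Nat) : Int) + 1).toNat = D + 1 from by omega]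
  have H := altLoop table D hPre D (List.replicate (D + 1) 0) le_rfl (by simp) (by
    intro k hk1 hk2
    have hkD : k = D := by omega
    subst hkD
    simp [pvOpt_hzero table D D le_rfl])
  rw [PySem.List.pyGetD_zero]
  exact H.2 0 (Nat.zero_le D)

lemma sol_eq_opt (day : Int) (table : List (Int × Int)) (hday : 0 ≤ day)
    (hPre : ∀ i : Nat, i < table.length → (i : Int) + pvT table i ≤ day → 1 ≤ pvT table i) :
    solution day table = pvOpt table day.toNat 0 := by
  have hsol : solution day table = PySem.List.pyGetD
      ((PySem.List.pyRange 1 (day + 1) 1).foldl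
        (solStep ((PySem.List.enumerate table 0).foldl
          (fun d p => if p.1 + p.2.1 ≤ day then d.modify (p.1 + p.2.1) [] (fun l => l ++ [p.2]) else d)
          ((PySem.List.pyRange 1 (day + 1) 1).foldl (fun d i => d.insert i []) PySem.Dict.empty)))
        (PySem.List.pyRepeat [0] (day + 1))) (-1) 0 := rfl
  rw [hsol]
  set D := day.toNat with hDdef
  have hD : day = ((D : Nat) : Int) := by omega
  rw [hD] at hPre
  rw [hD, PySem.List.pyRepeat_singleton, show (((D : Nat) : Int) + 1).toNat = D + 1 from by omega]
  have harr : ∀ e : Int, ((PySem.List.enumerate table 0).foldl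
      (fun d p => if p.1 + p.2.1 ≤ ((D : Nat) : Int) then d.modify (p.1 + p.2.1) [] (fun l => l ++ [p.2]) else d)
      ((PySem.List.pyRange 1 (((D : Nat) : Int) + 1) 1).foldl (fun d i => d.insert i []) PySem.Dict.empty)).getD e []
      = ((((PySem.List.enumerate table 0).filter (fun p => decide (p.1 + p.2.1 ≤ ((D : Nat) : Int)))).map
        (fun p => (p.1 + p.2.1, p.2))).filter (fun q => q.1 == e)).map (fun q => q.2) :=
    fun e => arr_getD table ((D : Nat) : Int) e
  have H := solLoop table D hPre _ harr 0 (List.replicate (D + 1) 0) (Nat.zero_le D) (by simp) (by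
    intro k hk
    have hk0 : k = 0 := by omega
    subst hk0
    simp [pvOpt_hzero table 0 0 le_rfl])
  rw [show ((0 : Nat) : Int) + 1 = (1 : Int) from by norm_num] at H
  obtain ⟨hlenf, hvals⟩ := H
  have hne : ((PySem.List.pyRange 1 ((D : Int) + 1) 1).foldl
      (solStep ((PySem.List.enumerate table 0).foldl
        (fun d p => if p.1 + p.2.1 ≤ ((D : Nat) : Int) then d.modify (p.1 + p.2.1) [] (fun l => l ++ [p.2]) else d)
        ((PySem.List.pyRange 1 (((D : Nat) : Int) + 1) 1).foldl (fun d i => d.insert i []) PySem.Dict.empty)))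
      (List.replicate (D + 1) 0)) ≠ [] := by
    apply List.ne_nil_of_length_pos
    rw [hlenf]; omega
  rw [PySem.List.pyGetD_neg_one _ _ hne, List.getLast_eq_getElem]
  have h2 := hvals D le_rfl
  rw [List.getD_eq_getElem _ _ (by rw [hlenf]; omega)] at h2
  convert h2 using 2
  rw [hlenf]
  omega

-- ===== VERDICT (by name: the statement is the Claim_ definition above) =====
theorem solution_spec : Claim_equal_solution := by
  intro day table _ hpre
  obtain ⟨hday, hjobs⟩ := hpre
  have hPre' : ∀ i : Nat, i < table.length → (i : Int) + pvT table i ≤ day → 1 ≤ pvT table i := by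
    intro i hi hle
    rcases hjobs i (List.mem_range.mpr hi) with h | h
    · exact h
    · exact absurd hle (by unfold pvT; omega)
  unfold Spec_solution
  rw [sol_eq_opt day table hday hPre', alt_eq_opt day table hday hPre']
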